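-- pv_equiv track=rewrite | github.com/EDSChrono/AdventOfCode | 2022/Python/5.py | transpose_stack_data
-- ===== SOURCE A (Python) =====
-- def transpose_stack_data(lines):
--     stack_list = []
--     for line in lines:
--         # stop when we reach an empty line
--         if line == '':
--             break
--         no_stacks = (len(line)+1)//4
--         # make empty sublist for stacks
--         while len(stack_list) < no_stacks:
--             stack_list.append([])
--         # populate stack with label if applicable
--         for stack in range(no_stacks):
--             box_label = line[1+4*stack]
--             if 'A'<=box_label<='Z':
--                 stack_list[stack].append(box_label)
--     return(stack_list)
-- ===== SOURCE B (Python) =====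
-- def transpose_stack_data(lines):
--     # gather rows up to (not including) the first empty line
--     rows = []
--     for line in lines:
--         if line == '':
--             break
--         rows.append(line)
--     # total number of stacks = widest row
--     width = max(((len(r) + 1) // 4 for r in rows), default=0)
--     # column-major extraction: column c holds the uppercase labels at index 1+4*c
--     return [[r[1 + 4*c] for r in rows
--              if 4*c + 3 <= len(r) and 'A' <= r[1 + 4*c] <= 'Z']
--             for c in range(width)]
-- ===== Notes on version B (the rewrite author's own statement) =====
-- stated objective: alternative
-- what changed: Replaces A's row-major incremental growth of stack_list (extend-with-[] then append into mutable sublists) by a column-major pass: gather rows up to the first empty line, precompute the number of stacks, then build each column independently with a comprehension.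
import Mathlib
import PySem

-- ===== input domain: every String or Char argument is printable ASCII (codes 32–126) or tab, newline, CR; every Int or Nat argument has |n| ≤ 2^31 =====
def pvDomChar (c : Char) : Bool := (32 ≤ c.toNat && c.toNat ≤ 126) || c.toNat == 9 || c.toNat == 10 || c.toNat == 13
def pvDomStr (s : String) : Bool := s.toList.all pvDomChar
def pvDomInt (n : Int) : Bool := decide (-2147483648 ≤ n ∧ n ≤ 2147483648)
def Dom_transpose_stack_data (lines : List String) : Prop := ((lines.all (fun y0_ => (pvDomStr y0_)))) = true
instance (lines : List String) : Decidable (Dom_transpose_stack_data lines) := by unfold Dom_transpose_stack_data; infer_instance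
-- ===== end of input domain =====

-- B replaces A's row-major incremental growth of the stack list by a
-- precompute-width-then-extract-columns pass (objective: alternative decomposition).

-- ===== PORT A =====
-- one iteration of A's `for line in lines` body (indices 1+4*stack are always
-- in range since stack < (len+1)//4, so getD with a dummy default is exact)
def pvRowStep (cs : List Char) (acc : List (List String)) : List (List String) :=
  let n := (cs.length + 1) / 4
  let ext := acc ++ List.replicate (n - acc.length) ([] : List String)
  (List.range n).foldl (fun a stack =>
    let ch := cs.getD (1 + 4 * stack) ' '
    if 'A' ≤ ch ∧ ch ≤ 'Z' then a.modify stack (fun l => l ++ [String.singleton ch]) else a) ext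

def pvGoA : List String → List (List String) → List (List String)
  | [], acc => acc
  | line :: rest, acc => if line = "" then acc else pvGoA rest (pvRowStep line.toList acc)

def transpose_stack_data (lines : List String) : List (List String) :=
  pvGoA lines []

-- ===== PORT B =====
-- the rows up to (not including) the first empty line
def pvRows : List String → List String
  | [] => []
  | l :: rest => if l = "" then [] else l :: pvRows rest

-- B's column comprehension for column c
def pvCol (rows : List String) (c : Nat) : List String :=
  rows.filterMap (fun r =>
    let cs := r.toList
    if 4 * c + 3 ≤ cs.length then
      let ch := cs.getD (1 + 4 * c) ' '
      if 'A' ≤ ch ∧ ch ≤ 'Z' then some (String.singleton ch) else none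
    else none)

def transpose_stack_data_alt (lines : List String) : List (List String) :=
  let rows := pvRows lines
  let width := (rows.map (fun r => (r.toList.length + 1) / 4)).foldl max 0
  (List.range width).map (fun c => pvCol rows c)

-- ===== PRECONDITION & SPEC =====
def Spec_transpose_stack_data (lines : List String) (out : List (List String)) : Prop := out = transpose_stack_data_alt lines
instance (lines : List String) (out : List (List String)) : Decidable (Spec_transpose_stack_data lines out) := by unfold Spec_transpose_stack_data; infer_instance

-- ===== CLAIM (what is proved, stated in full; the proofs are below) =====
def Claim_equal_transpose_stack_data : Prop := ∀ (lines : List String), Dom_transpose_stack_data lines → Spec_transpose_stack_data lines (transpose_stack_data lines)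

-- ===== LEMMAS AND PROOFS =====

-- A's loop over lines equals a fold of the row step over the gathered rows
theorem pvGoA_eq_foldl (lines : List String) (acc : List (List String)) :
    pvGoA lines acc = (pvRows lines).foldl (fun a r => pvRowStep r.toList a) acc := by
  induction lines generalizing acc with
  | nil => rfl
  | cons l rest ih =>
    simp only [pvGoA, pvRows]
    split
    · rfl
    · simp [ih]

theorem pvFoldl_modify_length (cs : List Char) (l : List Nat) (a : List (List String)) :
    (l.foldl (fun a stack =>
      let ch := cs.getD (1 + 4 * stack) ' '
      if 'A' ≤ ch ∧ ch ≤ 'Z' then a.modify stack (fun l => l ++ [String.singleton ch]) else a) a).length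
    = a.length := by
  induction l generalizing a with
  | nil => rfl
  | cons x t ih => simp only [List.foldl_cons]; rw [ih]; split <;> simp

theorem pvRowStep_length (cs : List Char) (acc : List (List String)) :
    (pvRowStep cs acc).length = max acc.length ((cs.length + 1) / 4) := by
  unfold pvRowStep
  rw [pvFoldl_modify_length]
  simp only [List.length_append, List.length_replicate]
  omega

theorem pvFoldl_max_eq (l : List Nat) (a : Nat) :
    l.foldl max a = max a (l.foldl max 0) := by
  induction l generalizing a with
  | nil => simp
  | cons x t ih => simp only [List.foldl_cons]; rw [ih, ih (max 0 x)]; omega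

theorem pvExt_getD (acc : List (List String)) (k c : Nat) :
    (acc ++ List.replicate k ([] : List String)).getD c [] = acc.getD c [] := by
  simp only [List.getD, List.getElem?_append, List.getElem?_replicate]
  split
  · rfl
  · have : acc[c]? = none := by
      rw [List.getElem?_eq_none_iff]; omega
    rw [this]; split <;> simp

theorem pvFoldl_modify_getD (cs : List Char) (n : Nat) (a : List (List String)) (c : Nat)
    (hn : n ≤ a.length) :
    ((List.range n).foldl (fun a stack =>
      let ch := cs.getD (1 + 4 * stack) ' '
      if 'A' ≤ ch ∧ ch ≤ 'Z' then a.modify stack (fun l => l ++ [String.singleton ch]) else a) a).getD c []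
    = if c < n ∧ ('A' ≤ cs.getD (1 + 4 * c) ' ' ∧ cs.getD (1 + 4 * c) ' ' ≤ 'Z')
      then a.getD c [] ++ [String.singleton (cs.getD (1 + 4 * c) ' ')]
      else a.getD c [] := by
  induction n with
  | zero => simp
  | succ m ih =>
    rw [List.range_succ, List.foldl_append]
    have hm : m ≤ a.length := by omega
    set F := (List.range m).foldl (fun a stack =>
      let ch := cs.getD (1 + 4 * stack) ' '
      if 'A' ≤ ch ∧ ch ≤ 'Z' then a.modify stack (fun l => l ++ [String.singleton ch]) else a) a with hF
    have hFlen : F.length = a.length := pvFoldl_modify_length cs _ a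
    simp only [List.foldl_cons, List.foldl_nil]
    by_cases hcm : c = m
    · subst hcm
      have hFc : F.getD c [] = a.getD c [] := by rw [ih hm]; simp
      have hlt : c < F.length := by omega
      have hsome : F[c]? = some (F.getD c []) := by
        rw [List.getElem?_eq_getElem hlt, List.getD_eq_getElem F [] hlt]
      by_cases hch : 'A' ≤ cs.getD (1 + 4 * c) ' ' ∧ cs.getD (1 + 4 * c) ' ' ≤ 'Z'
      · rw [if_pos hch, if_pos ⟨Nat.lt_succ_self c, hch⟩]
        rw [List.getD_eq_getElem?_getD, List.getElem?_modify, hsome]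
        rw [hFc]
        simp
      · rw [if_neg hch, if_neg (fun h => hch h.2), ih hm, if_neg (fun h => hch h.2)]
    · have hskip : ((if 'A' ≤ cs.getD (1 + 4 * m) ' ' ∧ cs.getD (1 + 4 * m) ' ' ≤ 'Z'
          then F.modify m (fun l => l ++ [String.singleton (cs.getD (1 + 4 * m) ' ')]) else F)).getD c []
          = F.getD c [] := by
        split
        · rw [List.getD_eq_getElem?_getD, List.getElem?_modify]
          cases hx : F[c]? <;> simp [List.getD, hx, (show ¬ m = c by omega)]
        · rfl
      rw [hskip, ih hm]
      have hiff : c < m ↔ c < m + 1 := by omega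
      by_cases hch : 'A' ≤ cs.getD (1 + 4 * c) ' ' ∧ cs.getD (1 + 4 * c) ' ' ≤ 'Z'
      · by_cases hc : c < m
        · rw [if_pos ⟨hc, hch⟩, if_pos ⟨hiff.mp hc, hch⟩]
        · rw [if_neg (fun h => hc h.1), if_neg (fun h => hc (hiff.mpr h.1))]
      · rw [if_neg (fun h => hch h.2), if_neg (fun h => hch h.2)]

theorem pvRowStep_getD (cs : List Char) (acc : List (List String)) (c : Nat) :
    (pvRowStep cs acc).getD c []
    = acc.getD c [] ++
      (if 4 * c + 3 ≤ cs.length then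
        (if 'A' ≤ cs.getD (1 + 4 * c) ' ' ∧ cs.getD (1 + 4 * c) ' ' ≤ 'Z'
         then [String.singleton (cs.getD (1 + 4 * c) ' ')] else [])
       else []) := by
  unfold pvRowStep
  have hn : (cs.length + 1) / 4 ≤ (acc ++ List.replicate ((cs.length + 1) / 4 - acc.length) ([] : List String)).length := by
    simp only [List.length_append, List.length_replicate]; omega
  rw [pvFoldl_modify_getD cs _ _ c hn, pvExt_getD]
  have hiff : c < (cs.length + 1) / 4 ↔ 4 * c + 3 ≤ cs.length := by omega
  by_cases h1 : 4 * c + 3 ≤ cs.length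
  · by_cases h2 : 'A' ≤ cs.getD (1 + 4 * c) ' ' ∧ cs.getD (1 + 4 * c) ' ' ≤ 'Z'
    · rw [if_pos ⟨hiff.mpr h1, h2⟩, if_pos h1, if_pos h2]
    · rw [if_neg (by tauto), if_pos h1, if_neg h2]; simp
  · rw [if_neg (by rw [hiff]; tauto), if_neg h1]; simp

theorem pvFoldl_getD (rows : List String) (acc : List (List String)) (c : Nat) :
    ((rows.foldl (fun a r => pvRowStep r.toList a) acc)).getD c []
    = acc.getD c [] ++ pvCol rows c := by
  induction rows generalizing acc with
  | nil => simp [pvCol]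
  | cons r t ih =>
    simp only [List.foldl_cons]
    rw [ih, pvRowStep_getD]
    simp only [pvCol, List.filterMap_cons]
    split
    · rename_i h1
      split
      · rename_i h2
        simp [List.append_assoc]
      · simp
    · simp

theorem pvFoldl_length (rows : List String) (acc : List (List String)) :
    (rows.foldl (fun a r => pvRowStep r.toList a) acc).length
    = max acc.length ((rows.map (fun r => (r.toList.length + 1) / 4)).foldl max 0) := by
  induction rows generalizing acc with
  | nil => simp
  | cons r t ih =>
    simp only [List.foldl_cons, List.map_cons]
    rw [ih, pvRowStep_length, pvFoldl_max_eq _ (max 0 ((r.toList.length + 1) / 4))]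
    omega

-- ===== VERDICT (by name: the statement is the Claim_ definition above) =====
theorem transpose_stack_data_spec : Claim_equal_transpose_stack_data := by
  intro lines _
  unfold Spec_transpose_stack_data transpose_stack_data transpose_stack_data_alt
  rw [pvGoA_eq_foldl]
  set rows := pvRows lines
  set W := (rows.map (fun r => (r.toList.length + 1) / 4)).foldl max 0 with hW
  have hlen : (rows.foldl (fun a r => pvRowStep r.toList a) []).length = W := by
    rw [pvFoldl_length]; simp [hW]
  apply List.ext_getElem
  · simp only [List.length_map, List.length_range]
    exact hlen
  · intro i h1 h2
    have hgd : (rows.foldl (fun a r => pvRowStep r.toList a) ([] : List (List String))).getD i []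
        = pvCol rows i := by
      rw [pvFoldl_getD]; simp
    have : (rows.foldl (fun a r => pvRowStep r.toList a) ([] : List (List String)))[i]
        = (rows.foldl (fun a r => pvRowStep r.toList a) ([] : List (List String))).getD i [] := by
      simp [List.getD, List.getElem?_eq_getElem h1]
    rw [this, hgd]
    simp
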